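-- pv_equiv track=rewrite | github.com/isj0/Data-Structures-and-Algorithms | chapter_20/group_sort.py | group_sort
-- ===== SOURCE A (Python) =====
-- def group_sort(array):
--     hash_table = {}
--     new_array = []
--
--     for value in array:
--         if value in hash_table:
--             hash_table[value] += 1
--         else:
--             hash_table[value] = 1
--
--     for key in hash_table:
--         count = hash_table[key]
--         for i in range(count):
--             new_array.append(key)
--
--     return new_array
-- ===== SOURCE B (Python) =====
-- def group_sort(array):
--     new_array = []
--     seen = set()
--     for value in array:
--         if value not in seen:
--             seen.add(value)
--             new_array += [value] * array.count(value)
--     return new_array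
-- ===== Notes on version B (the rewrite author's own statement) =====
-- stated objective: simpler
-- what changed: A builds a frequency hash table in one pass and then emits each key count times from the table with nested loops; B makes a single pass over the array, and at each value's first occurrence emits all its copies at once via list repetition with array.count, tracking first occurrences in a set (no frequency table, no emit loops).
import Mathlib
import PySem

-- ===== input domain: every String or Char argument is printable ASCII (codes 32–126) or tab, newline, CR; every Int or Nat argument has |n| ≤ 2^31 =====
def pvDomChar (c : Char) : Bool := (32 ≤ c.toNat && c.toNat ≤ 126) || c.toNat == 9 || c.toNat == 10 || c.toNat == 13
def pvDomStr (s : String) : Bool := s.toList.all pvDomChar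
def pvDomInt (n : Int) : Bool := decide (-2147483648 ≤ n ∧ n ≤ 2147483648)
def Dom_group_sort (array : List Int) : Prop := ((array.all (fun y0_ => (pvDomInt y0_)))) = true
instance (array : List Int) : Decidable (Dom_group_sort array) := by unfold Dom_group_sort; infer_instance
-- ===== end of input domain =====

-- B replaces A's count-table-then-emit with a single first-occurrence pass that emits each
-- group at once by list repetition (objective: simpler; not faster).

-- ===== PORT A =====
def group_sort (array : List Int) : List Int :=
  let hash_table : PySem.Dict Int Int :=
    array.foldl
      (fun d value =>
        if d.contains value then d.modify value 0 (· + 1) else d.insert value 1)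
      PySem.Dict.empty
  hash_table.items.foldl
    (fun new_array kv =>
      (PySem.List.pyRange 0 kv.2 1).foldl (fun a _ => a ++ [kv.1]) new_array)
    []

-- ===== PORT B =====
def group_sort_alt (array : List Int) : List Int :=
  (array.foldl
    (fun (st : List Int × PySem.Set Int) value =>
      if PySem.Set.contains st.2 value then st
      else (st.1 ++ PySem.List.pyRepeat [value] ((PySem.List.count array value : Int)),
            PySem.Set.add st.2 value))
    ([], PySem.Set.empty)).1

-- ===== PRECONDITION & SPEC =====
def Spec_group_sort (array : List Int) (out : List Int) : Prop := out = group_sort_alt array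
instance (array : List Int) (out : List Int) : Decidable (Spec_group_sort array out) := by unfold Spec_group_sort; infer_instance

-- ===== CLAIM (what is proved, stated in full; the proofs are below) =====
def Claim_equal_group_sort : Prop := ∀ (array : List Int), Dom_group_sort array → Spec_group_sort array (group_sort array)

-- ===== LEMMAS AND PROOFS =====

-- A's counting loop is Counter(array)
theorem gs_table_eq_counter (array : List Int) :
    array.foldl
      (fun (d : PySem.Dict Int Int) value =>
        if d.contains value then d.modify value 0 (· + 1) else d.insert value 1)
      PySem.Dict.empty = PySem.Dict.counter array := by
  rw [PySem.Dict.counter_eq_foldl]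
  congr 1
  funext d v
  by_cases h : d.contains v
  · simp [h]
  · simp only [Bool.not_eq_true] at h
    simp [h, PySem.Dict.modify, PySem.Dict.getD_of_not_contains d 0 h]

theorem gs_foldl_app_const (k : Int) :
    ∀ (l : List Int) (acc : List Int),
      l.foldl (fun a _ => a ++ [k]) acc = acc ++ List.replicate l.length k := by
  intro l
  induction l with
  | nil => simp
  | cons x t ih => intro acc; simp [List.foldl_cons, ih, List.replicate_succ]

theorem gs_length_pyRange (n : Int) : (PySem.List.pyRange 0 n 1).length = n.toNat := by
  simp only [PySem.List.pyRange]
  split_ifs with h1 h2 h3 <;> simp_all; omega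

-- A's inner emit loop appends count copies of the key
theorem gs_emit_replicate (k : Int) (n : Int) (acc : List Int) :
    (PySem.List.pyRange 0 n 1).foldl (fun a _ => a ++ [k]) acc = acc ++ List.replicate n.toNat k := by
  rw [gs_foldl_app_const, gs_length_pyRange]

-- A's outer emit loop is a flatMap over the table items
theorem gs_emit_fold (items : List (Int × Int)) :
    ∀ (acc : List Int),
    items.foldl (fun na kv => (PySem.List.pyRange 0 kv.2 1).foldl (fun a _ => a ++ [kv.1]) na) acc
      = acc ++ items.flatMap (fun kv => List.replicate kv.2.toNat kv.1) := by
  induction items with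
  | nil => simp
  | cons kv t ih =>
      intro acc
      rw [List.foldl_cons, gs_emit_replicate, ih, List.flatMap_cons, List.append_assoc]

-- A's result: replicated counts in first-occurrence order
theorem gs_A_eq (array : List Int) :
    group_sort array =
      (PySem.Set.ofList array).flatMap (fun k => List.replicate (List.count k array) k) := by
  simp only [group_sort, gs_table_eq_counter, gs_emit_fold, List.nil_append,
    PySem.Dict.items_counter, List.flatMap_map]
  simp

-- B's loop invariant: the emitted groups are those of the values not yet seen
theorem gs_B_inv (g : Int → List Int) :
    ∀ (l : List Int) (r : List Int) (s : PySem.Set Int),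
    (l.foldl (fun (st : List Int × PySem.Set Int) v =>
        if PySem.Set.contains st.2 v then st else (st.1 ++ g v, PySem.Set.add st.2 v)) (r, s)).1
      = r ++ ((PySem.Set.update s l).drop s.length).flatMap g := by
  intro l
  induction l with
  | nil => intro r s; simp [PySem.Set.update_nil]
  | cons x t ih =>
      intro r s
      rw [List.foldl_cons, PySem.Set.update_cons]
      by_cases h : PySem.Set.contains s x
      · have hx : x ∈ s := (PySem.Set.contains_iff s x).mp h
        simp only [h, if_true]
        rw [ih, PySem.Set.add_of_mem hx]
      · have hx : x ∉ s := fun hm => h ((PySem.Set.contains_iff s x).mpr hm)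
        simp only [h, if_false, Bool.false_eq_true]
        rw [ih, PySem.Set.add_of_not_mem hx]
        rw [PySem.Set.update_eq_append_filter]
        generalize List.filter (fun y => !(s ++ [x]).contains y) (PySem.Set.ofList t) = F
        have h1 : List.drop (s ++ [x]).length (s ++ [x] ++ F) = F := List.drop_left
        have h2 : List.drop s.length (s ++ [x] ++ F) = x :: F := by
          rw [List.append_assoc]
          exact List.drop_left
        rw [h1, h2, List.flatMap_cons]
        simp [List.append_assoc]

-- B's result: the same flatMap
theorem gs_B_eq (array : List Int) :
    group_sort_alt array =
      (PySem.Set.ofList array).flatMap (fun k => List.replicate (List.count k array) k) := by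
  unfold group_sort_alt
  rw [gs_B_inv]
  have hupd : PySem.Set.update PySem.Set.empty array = PySem.Set.ofList array := by
    rw [PySem.Set.update_eq_foldl, PySem.Set.ofList_eq_foldl]; rfl
  rw [hupd]
  simp [PySem.List.pyRepeat_singleton, PySem.List.count_eq]

-- ===== VERDICT (by name: the statement is the Claim_ definition above) =====
theorem group_sort_spec : Claim_equal_group_sort := by
  intro array _
  unfold Spec_group_sort
  rw [gs_A_eq, gs_B_eq]
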